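-- pv_equiv track=rewrite | github.com/Flam11ngo/PokemonSImulator | scripts/fetch_pokeapi_data.py | slug_to_name
-- ===== SOURCE A (Python) =====
-- def slug_to_name(slug: str) -> str:
--     out = []
--     upper = True
--     for ch in slug:
--         if ch == "-":
--             out.append(" ")
--             upper = True
--             continue
--         out.append(ch.upper() if upper else ch)
--         upper = False
--     return "".join(out)
-- ===== SOURCE B (Python) =====
-- def slug_to_name(slug: str) -> str:
--     return " ".join(w[:1].upper() + w[1:] for w in slug.split("-"))
-- ===== Notes on version B (the rewrite author's own statement) =====
-- stated objective: simpler
-- what changed: Replaced the char-by-char state machine with an upper flag by a word-level pass: split on the hyphen, uppercase only the first character of each piece, join with spaces.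
import Mathlib
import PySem

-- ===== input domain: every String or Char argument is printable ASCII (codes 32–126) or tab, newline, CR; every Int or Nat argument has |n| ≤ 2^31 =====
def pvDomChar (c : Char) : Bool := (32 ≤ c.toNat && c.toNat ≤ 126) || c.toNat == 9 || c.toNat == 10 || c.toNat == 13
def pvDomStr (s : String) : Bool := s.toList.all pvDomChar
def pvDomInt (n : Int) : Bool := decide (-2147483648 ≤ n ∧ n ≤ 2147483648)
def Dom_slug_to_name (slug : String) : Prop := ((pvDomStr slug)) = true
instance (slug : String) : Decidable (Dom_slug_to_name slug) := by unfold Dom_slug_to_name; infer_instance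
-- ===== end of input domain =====

-- B replaces A's character-by-character upper-flag state machine with a split-on-hyphen,
-- capitalize the first character of each piece, join with spaces (objective: simpler).


-- ===== PORT A =====
-- for ch in slug: append ' ' on '-', else append ch.upper() if upper else ch; carry the flag
def slug_to_name (slug : String) : String :=
  String.ofList
    (slug.toList.foldl
      (fun (st : List Char × Bool) ch =>
        if ch = '-' then (st.1 ++ [' '], true)
        else (st.1 ++ [if st.2 then PySem.Chars.upperChar ch else ch], false))
      ([], true)).1

-- ===== PORT B =====
-- w[:1].upper() + w[1:]
def capFirst (w : List Char) : List Char :=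
  PySem.Chars.upper (PySem.List.slice w none (some 1)) ++ PySem.List.slice w (some 1) none

-- " ".join(capFirst(w) for w in slug.split("-"))
def slug_to_name_alt (slug : String) : String :=
  String.ofList (PySem.Chars.join [' '] ((slug.toList.splitOn '-').map capFirst))

-- ===== PRECONDITION & SPEC =====
def Spec_slug_to_name (slug : String) (out : String) : Prop := out = slug_to_name_alt slug
instance (slug : String) (out : String) : Decidable (Spec_slug_to_name slug out) := by unfold Spec_slug_to_name; infer_instance

-- ===== CLAIM (what is proved, stated in full; the proofs are below) =====
def Claim_equal_slug_to_name : Prop := ∀ (slug : String), Dom_slug_to_name slug → Spec_slug_to_name slug (slug_to_name slug)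

-- ===== LEMMAS AND PROOFS =====

-- A's loop written as structural recursion (proof-side view of the fold)
def goA : List Char → Bool → List Char
  | [], _ => []
  | c :: cs, u =>
    if c = '-' then ' ' :: goA cs true
    else (if u then PySem.Chars.upperChar c else c) :: goA cs false

theorem foldA_eq_goA (cs : List Char) (acc : List Char) (u : Bool) :
    (cs.foldl
      (fun (st : List Char × Bool) ch =>
        if ch = '-' then (st.1 ++ [' '], true)
        else (st.1 ++ [if st.2 then PySem.Chars.upperChar ch else ch], false))
      (acc, u)).1 = acc ++ goA cs u := by
  induction cs generalizing acc u with
  | nil => simp [goA]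
  | cons c cs ih =>
    simp only [List.foldl_cons, goA]
    by_cases h : c = '-' <;> simp [h, ih]

theorem capFirst_nil : capFirst [] = [] := by
  simp [capFirst, PySem.List.slice, PySem.Chars.upper]

theorem capFirst_cons (c : Char) (w : List Char) :
    capFirst (c :: w) = PySem.Chars.upperChar c :: w := by
  simp [capFirst, PySem.Chars.upper, PySem.List.slice_to, PySem.List.slice_from]

theorem splitOn_char_cons (c : Char) (cs : List Char) (d : Char) :
    (c :: cs).splitOn d =
      if c = d then [] :: cs.splitOn d else (cs.splitOn d).modifyHead (c :: ·) := by
  simp [List.splitOn, List.splitOnP_cons]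

theorem splitOn_char_ne_nil (cs : List Char) (d : Char) : cs.splitOn d ≠ [] := by
  simp only [List.splitOn]; exact List.splitOnP_ne_nil _ _

-- first piece capitalized only when u = true
def joinH (u : Bool) : List (List Char) → List Char
  | [] => []
  | p :: ps => PySem.Chars.join [' '] ((if u then capFirst p else p) :: ps.map capFirst)

theorem goA_eq_joinH (cs : List Char) (u : Bool) :
    goA cs u = joinH u (cs.splitOn '-') := by
  induction cs generalizing u with
  | nil => simp [goA, joinH, capFirst_nil, PySem.Chars.join_singleton]
  | cons c cs ih =>
    rw [splitOn_char_cons]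
    by_cases h : c = '-'
    · subst h
      simp only [goA, joinH, ih]
      obtain ⟨p, ps, hps⟩ := List.exists_cons_of_ne_nil (splitOn_char_ne_nil cs '-')
      rw [hps]
      simp [capFirst_nil, PySem.Chars.join_cons_cons]
    · simp only [goA, if_neg h, ih]
      obtain ⟨p, ps, hps⟩ := List.exists_cons_of_ne_nil (splitOn_char_ne_nil cs '-')
      rw [hps]
      cases ps with
      | nil =>
        cases u <;>
          simp [joinH, capFirst_cons, PySem.Chars.join_singleton, List.modifyHead]
      | cons q qs =>
        cases u <;>
          simp [joinH, capFirst_cons, PySem.Chars.join_cons_cons, List.modifyHead]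

theorem joinH_true (ps : List (List Char)) (h : ps ≠ []) :
    joinH true ps = PySem.Chars.join [' '] (ps.map capFirst) := by
  obtain ⟨p, ps, rfl⟩ := List.exists_cons_of_ne_nil h
  simp [joinH]

-- ===== VERDICT (by name: the statement is the Claim_ definition above) =====
theorem slug_to_name_spec : Claim_equal_slug_to_name := by
  intro slug _
  unfold Spec_slug_to_name slug_to_name slug_to_name_alt
  rw [foldA_eq_goA, List.nil_append, goA_eq_joinH,
    joinH_true _ (splitOn_char_ne_nil _ _)]
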